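-- pv_equiv track=rewrite | github.com/philleveridge/RBCpython | rbcontroller.py | servolistchk
-- ===== SOURCE A (Python) =====
-- def servolistchk(a,b) : #a=servo_list, b=database
--     if (a==b) : return True
--     for i in range (0,len(a)) :
--         if i==len(b):
--             return True
--         if a[i] != b[i] :
--             return False
--     return True
-- ===== SOURCE B (Python) =====
-- def servolistchk(a, b):
--     n = min(len(a), len(b))
--     return a[:n] == b[:n]
-- ===== Notes on version B (the rewrite author's own statement) =====
-- stated objective: simpler
-- what changed: Replaces the index-based early-exit loop (with its len(b) guard and redundant a==b fast path) by a single slice comparison of the two common prefixes.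
import Mathlib
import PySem

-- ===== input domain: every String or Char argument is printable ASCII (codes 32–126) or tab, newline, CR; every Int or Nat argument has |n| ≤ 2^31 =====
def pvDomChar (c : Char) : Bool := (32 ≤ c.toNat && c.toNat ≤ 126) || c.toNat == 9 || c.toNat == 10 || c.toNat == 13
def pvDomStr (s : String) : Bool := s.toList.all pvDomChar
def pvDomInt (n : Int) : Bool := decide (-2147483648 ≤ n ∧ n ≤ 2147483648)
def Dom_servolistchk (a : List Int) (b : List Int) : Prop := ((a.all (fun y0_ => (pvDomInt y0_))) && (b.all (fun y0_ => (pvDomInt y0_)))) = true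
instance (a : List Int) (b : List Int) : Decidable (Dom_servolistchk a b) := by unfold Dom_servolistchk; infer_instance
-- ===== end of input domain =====

-- B replaces A's index-based early-exit loop by one slice comparison of the two common prefixes (simpler).


-- ===== PORT A =====
-- the 'for i in range(0,len(a))' loop with its two early returns, as recursion on the index
def servolistchkLoop (a : List Int) (b : List Int) (i : Nat) : Bool :=
  if _h : i < a.length then
    if i = b.length then true
    else if PySem.List.pyGet? a (i : Int) ≠ PySem.List.pyGet? b (i : Int) then false
    else servolistchkLoop a b (i + 1)
  else true
termination_by a.length - i

def servolistchk (a : List Int) (b : List Int) : Bool :=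
  if a = b then true
  else servolistchkLoop a b 0

-- ===== PORT B =====
def servolistchk_alt (a : List Int) (b : List Int) : Bool :=
  let n := min a.length b.length
  decide (a.take n = b.take n)

-- ===== PRECONDITION & SPEC =====
def Spec_servolistchk (a : List Int) (b : List Int) (out : Bool) : Prop := out = servolistchk_alt a b
instance (a : List Int) (b : List Int) (out : Bool) : Decidable (Spec_servolistchk a b out) := by unfold Spec_servolistchk; infer_instance

-- ===== CLAIM (what is proved, stated in full; the proofs are below) =====
def Claim_equal_servolistchk : Prop := ∀ (a : List Int) (b : List Int), Dom_servolistchk a b → Spec_servolistchk a b (servolistchk a b)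

-- ===== LEMMAS AND PROOFS =====

-- loop invariant: from index i ≤ len b the loop decides equality of the remaining common prefix
theorem servolistchkLoop_eq (a b : List Int) (i : Nat) (hib : i ≤ b.length) :
    servolistchkLoop a b i
      = decide ((a.drop i).take (min a.length b.length - i)
              = (b.drop i).take (min a.length b.length - i)) := by
  rw [servolistchkLoop]
  by_cases ha : i < a.length
  · simp only [ha, dif_pos]
    by_cases hb : i = b.length
    · have : min a.length b.length - i = 0 := by omega
      simp [this]
      exact Or.inl hb
    · have hib' : i < b.length := by omega
      have hm : i < min a.length b.length := by omega
      have hga : PySem.List.pyGet? a (i : Int) = some a[i] := by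
        simp [PySem.List.pyGet?, PySem.List.pyIdx?, ha]
      have hgb : PySem.List.pyGet? b (i : Int) = some b[i] := by
        simp [PySem.List.pyGet?, PySem.List.pyIdx?, hib']
      have hda : a.drop i = a[i] :: a.drop (i + 1) := List.drop_eq_getElem_cons ha
      have hdb : b.drop i = b[i] :: b.drop (i + 1) := List.drop_eq_getElem_cons hib'
      have hsub : min a.length b.length - i = (min a.length b.length - (i + 1)) + 1 := by omega
      rw [hsub, hda, hdb]
      simp only [List.take_succ_cons]
      by_cases hne : a[i] = b[i]
      · simp only [if_neg hb, hga, hgb, hne, ne_eq, not_true_eq_false, if_false]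
        rw [servolistchkLoop_eq a b (i + 1) (by omega)]
        simp
      · simp [hb, hga, hgb, hne]
  · simp only [ha, dif_neg, not_false_iff]
    have : min a.length b.length - i = 0 := by omega
    simp [this]
termination_by a.length - i

theorem servolistchk_spec : Claim_equal_servolistchk := by
  unfold Claim_equal_servolistchk
  intro a b _
  unfold Spec_servolistchk servolistchk servolistchk_alt
  by_cases hab : a = b
  · subst hab
    simp
  · rw [if_neg hab, servolistchkLoop_eq a b 0 (Nat.zero_le _)]
    simp
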